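-- pv_equiv track=rewrite | github.com/andylehti/shep32-streamlit | app.py | distributeRadix
-- ===== SOURCE A (Python) =====
-- def extractTokens(s): return s.split()
--
-- def computeRadixDigits(val, b):
--     if val == 0: return ["0"]
--     powers = [(1, b)]
--     while powers[-1][1] <= val: powers.append((powers[-1][0] * 2, powers[-1][1] ** 2))
--     n = 0; curBn = 1
--     for pN, pVal in reversed(powers):
--         if curBn * pVal <= val: curBn *= pVal; n += pN
--     n += 1
--     def convert(v, targetLen):
--         if targetLen <= 500:
--             out = []
--             for _ in range(targetLen): out.append(str(v % b)); v //= b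
--             return out[::-1]
--         half = targetLen // 2
--         divisor = b ** half
--         upperVal, lowerVal = divmod(v, divisor)
--         return convert(upperVal, targetLen - half) + convert(lowerVal, half)
--     res = convert(val, n)
--     while len(res) > 1 and res[0] == "0": res.pop(0)
--     return res
--
-- def decodeRadixStream(n, b):
--     parts = extractTokens(n) if isinstance(n, str) else n
--     if not parts:
--         return 0
--     ints = [int(p) for p in parts]
--     def evalRange(start, end):
--         if end - start <= 200:
--             res = 0
--             for i in range(start, end):
--                 res = res * b + ints[i]
--             return res
--         mid = (start + end) // 2
--         return evalRange(start, mid) * (b ** (end - mid)) + evalRange(mid, end)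
--     return evalRange(0, len(ints))
--
-- def distributeRadix(n, k, b=8, y=1):
--     seedBase = 2 ** 16
--     stateDigits = computeRadixDigits(n, b)
--     schedule = [x for x in computeRadixDigits(k, seedBase) if 2 <= len(x) <= 10]
--     if not schedule:
--         schedule = [str((k % (seedBase - 2)) + 2)]
--     limit = (len(stateDigits) + 2) * 40
--     need = len(stateDigits) + 1 if y == 1 else len(stateDigits)
--     loops = 0
--     while len(schedule) < need:
--         nextSeed = int(schedule[-1]) + seedBase
--         schedule.extend(x for x in computeRadixDigits(nextSeed, seedBase) if 2 <= len(x) <= 10)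
--         loops += 1
--         if loops > limit:
--             break
--     if len(schedule) < need:
--         schedule.extend([schedule[-1]] * (need - len(schedule)))
--     if y == 1:
--         guard = (1 - (int(schedule[0]) % b)) % b
--         stateDigits = [str(guard)] + stateDigits
--         mixed = [str((int(a) + int(z)) % b) for a, z in zip(stateDigits, schedule)]
--         return decodeRadixStream(mixed, b)
--     mixed = [str((int(a) - int(z)) % b) for a, z in zip(stateDigits, schedule)]
--     return 0 if len(mixed) <= 1 else decodeRadixStream(mixed[1:], b)
-- ===== SOURCE B (Python) =====
-- def radixDigits(val, b):
--     if val == 0: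
--         return ["0"]
--     count = 1
--     p = b
--     while p <= val:
--         p *= b
--         count += 1
--
--     def emit(v, m):
--         if m <= 0:
--             return []
--         return emit(v // b, m - 1) + [str(v % b)]
--
--     out = emit(val, count)
--     i = 0
--     while i < len(out) - 1 and out[i] == "0":
--         i += 1
--     return out[i:]
--
--
-- def usable(x):
--     return 1 < len(x) < 11
--
--
-- def horner(digits, b):
--     res = 0
--     for d in digits:
--         res = res * b + int(d)
--     return res
--
--
-- def distributeRadix(n, k, b=8, y=1):
--     seedBase = 2 ** 16
--     state = radixDigits(n, b)
--     schedule = [x for x in radixDigits(k, seedBase) if usable(x)]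
--     if not schedule:
--         schedule = [str((k % (seedBase - 2)) + 2)]
--     limit = (len(state) + 2) * 40
--     need = len(state) + 1 if y == 1 else len(state)
--     for _ in range(limit + 1):
--         if len(schedule) < need:
--             schedule += [x for x in radixDigits(int(schedule[-1]) + seedBase, seedBase) if usable(x)]
--     if len(schedule) < need:
--         schedule += [schedule[-1]] * (need - len(schedule))
--     if y == 1:
--         guard = (1 - (int(schedule[0]) % b)) % b
--         return horner(map(lambda a, z: str((int(a) + int(z)) % b), [str(guard)] + state, schedule), b)
--     mixed = list(map(lambda a, z: str((int(a) - int(z)) % b), state, schedule))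
--     return 0 if len(mixed) <= 1 else horner(mixed[1:], b)
-- ===== Notes on version B (the rewrite author's own statement) =====
-- stated objective: simpler
-- what changed: B computes the digit count with a plain multiply loop instead of A's repeated-squaring powers table plus greedy binary decomposition, emits digits with a small recursion in significance order instead of A's divide-and-conquer convert with a reversal, builds the schedule with a bounded for-loop instead of a while/break counter, mixes via a two-iterable map (zipWith) instead of zip comprehensions, and decodes with a one-pass Horner fold instead of A's recursive evalRange split.
import Mathlib
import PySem

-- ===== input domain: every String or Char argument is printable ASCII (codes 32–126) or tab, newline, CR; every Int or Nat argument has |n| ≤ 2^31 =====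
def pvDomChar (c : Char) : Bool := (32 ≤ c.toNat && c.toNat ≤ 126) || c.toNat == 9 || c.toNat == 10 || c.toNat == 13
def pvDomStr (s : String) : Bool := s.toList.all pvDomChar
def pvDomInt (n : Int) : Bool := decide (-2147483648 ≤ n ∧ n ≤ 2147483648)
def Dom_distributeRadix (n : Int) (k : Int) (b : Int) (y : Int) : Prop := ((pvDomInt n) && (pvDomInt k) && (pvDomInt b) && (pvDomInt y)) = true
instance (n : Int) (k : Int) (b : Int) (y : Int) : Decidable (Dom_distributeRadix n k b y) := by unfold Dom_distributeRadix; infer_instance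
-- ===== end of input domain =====

-- B replaces A's repeated-squaring digit-count, divide-and-conquer base conversion and
-- divide-and-conquer decoding by a linear count loop, a recursive digit emitter, a bounded
-- for-loop schedule builder, zipWith mixing and a Horner fold (objective: simpler).

-- int(s); exact here: every string parsed by either program is produced by str(·) (PySem.Int.toStr)
def pvIntOf (s : String) : Int := (PySem.Int.ofStr? s).getD 0

-- ===== PORT A =====

-- `powers = [(1, b)]; while powers[-1][1] <= val: powers.append((last*2, lastVal**2))`.
-- The extra conjunct `q < q * q` is a pure termination guard: it holds at every state this
-- loop reaches when it terminates in Python (|q| ≥ 2, or the exit test fails first), and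
-- fails exactly where Python diverges (b ∈ {0, 1} with the exit test true — outside Pre_).
def powersAuxA (val : Int) (e q : Int) : List (Int × Int) :=
  if h : q ≤ val ∧ q < q * q then (e, q) :: powersAuxA val (e * 2) (q * q) else [(e, q)]
termination_by (val + 1 - q).toNat + (if q < 0 then 1 else 0)
decreasing_by
  rcases h with ⟨h1, h2⟩
  have hqq : 0 ≤ q * q := mul_self_nonneg q
  generalize hA : q * q = a at h2 hqq
  rw [if_neg (by omega : ¬ a < 0)]
  by_cases hq : q < 0
  · rw [if_pos hq]; omega
  · rw [if_neg hq]; omega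

-- convert(v, targetLen): divide and conquer below 500; `out[::-1]` is List.reverse
-- (PySem.List.slice?_none_none_neg_one); `b ** half` with half ≥ 250 > 0 is `b ^ half.toNat`;
-- `divmod(v, divisor)` is (floordiv, mod) — exact since divisor ≠ 0 (b ≠ 0 under Pre_).
def convertA (b v tl : Int) : List String :=
  if tl ≤ 500 then
    ((PySem.List.pyRange 0 tl 1).foldl
      (fun (st : List String × Int) _ =>
        (st.1 ++ [PySem.Int.toStr (PySem.Int.mod st.2 b)], PySem.Int.floordiv st.2 b))
      ([], v)).1.reverse
  else
    let half := PySem.Int.floordiv tl 2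
    let divisor := b ^ half.toNat
    let upperVal := PySem.Int.floordiv v divisor
    let lowerVal := PySem.Int.mod v divisor
    convertA b upperVal (tl - half) ++ convertA b lowerVal half
termination_by tl.toNat
decreasing_by
  all_goals
    rename_i h
    rw [PySem.Int.floordiv_eq_ediv_of_pos (by norm_num : (0:Int) < 2)]
    omega

-- `while len(res) > 1 and res[0] == "0": res.pop(0)`
def stripA : List String → List String
  | x :: y :: rest => if x = "0" then stripA (y :: rest) else x :: y :: rest
  | l => l

def computeRadixDigitsA (val b : Int) : List String :=
  if val = 0 then ["0"]
  else
    let powers := powersAuxA val 1 b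
    let st := (powers.reverse).foldl
      (fun (st : Int × Int) (p : Int × Int) =>
        if st.2 * p.2 ≤ val then (st.1 + p.1, st.2 * p.2) else st) (0, 1)
    stripA (convertA b val (st.1 + 1))

-- evalRange(start, end); `b ** (end - mid)` has positive exponent, so `^ (… ).toNat` is exact
def evalRangeA (b : Int) (ints : List Int) (s e : Int) : Int :=
  if e - s ≤ 200 then
    (PySem.List.pyRange s e 1).foldl (fun res i => res * b + PySem.List.pyGetD ints i 0) 0
  else
    let mid := PySem.Int.floordiv (s + e) 2
    evalRangeA b ints s mid * b ^ (e - mid).toNat + evalRangeA b ints mid e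
termination_by (e - s).toNat
decreasing_by
  all_goals
    rename_i h
    rw [PySem.Int.floordiv_eq_ediv_of_pos (by norm_num : (0:Int) < 2)]
    omega

-- decodeRadixStream for a list argument (the only way distributeRadix calls it)
def decodeRadixStreamA (parts : List String) (b : Int) : Int :=
  if parts = [] then 0
  else
    let ints := parts.map pvIntOf
    evalRangeA b ints 0 (PySem.List.len ints)

def schedFilterA (l : List String) : List String :=
  l.filter (fun x => decide (2 ≤ PySem.Str.len x ∧ PySem.Str.len x ≤ 10))

-- `loops = 0; while len(schedule) < need: …; loops += 1; if loops > limit: break`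
-- runs the body at most limit+1 times: the fuel is exactly that counter.
def schedLoopA (need : Int) : Nat → List String → List String
  | 0, sched => sched
  | f + 1, sched =>
    if PySem.List.len sched < need then
      schedLoopA need f
        (sched ++ schedFilterA (computeRadixDigitsA
          (pvIntOf (PySem.List.pyGetD sched (-1) "") + 65536) 65536))
    else sched

def distributeRadix (n : Int) (k : Int) (b : Int) (y : Int) : Int :=
  let stateDigits := computeRadixDigitsA n b
  let sched0 := schedFilterA (computeRadixDigitsA k 65536)
  let sched1 := if sched0 = [] then [PySem.Int.toStr (PySem.Int.mod k (65536 - 2) + 2)] else sched0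
  let limit := (PySem.List.len stateDigits + 2) * 40
  let need := if y = 1 then PySem.List.len stateDigits + 1 else PySem.List.len stateDigits
  let sched2 := schedLoopA need (limit + 1).toNat sched1
  let sched3 :=
    if PySem.List.len sched2 < need then
      sched2 ++ List.replicate (need - PySem.List.len sched2).toNat (PySem.List.pyGetD sched2 (-1) "")
    else sched2
  if y = 1 then
    let guard := PySem.Int.mod (1 - PySem.Int.mod (pvIntOf (PySem.List.pyGetD sched3 0 "")) b) b
    let mixed := ((PySem.Int.toStr guard :: stateDigits).zip sched3).map
      (fun az => PySem.Int.toStr (PySem.Int.mod (pvIntOf az.1 + pvIntOf az.2) b))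
    decodeRadixStreamA mixed b
  else
    let mixed := (stateDigits.zip sched3).map
      (fun az => PySem.Int.toStr (PySem.Int.mod (pvIntOf az.1 - pvIntOf az.2) b))
    if PySem.List.len mixed ≤ 1 then 0 else decodeRadixStreamA (PySem.List.slice mixed (some 1) none) b

-- ===== PORT B =====

-- `count = 1; p = b; while p <= val: p *= b; count += 1`.  The two natAbs conjuncts are pure
-- termination guards: they hold at every state the Python loop reaches when it terminates
-- (|b| ≥ 2), and fail exactly where Python diverges (outside Pre_).
def countLoopB (val b cnt p : Int) : Int :=
  if h : p ≤ val ∧ p.natAbs < (p * b).natAbs ∧ p.natAbs ≤ (val.natAbs + 1) * b.natAbs then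
    countLoopB val b (cnt + 1) (p * b)
  else cnt
termination_by ((val.natAbs + 1) * b.natAbs * b.natAbs + 1) - p.natAbs
decreasing_by
  rcases h with ⟨-, h2, h3⟩
  have : (p * b).natAbs = p.natAbs * b.natAbs := Int.natAbs_mul p b
  have : (val.natAbs + 1) * b.natAbs * b.natAbs = ((val.natAbs + 1) * b.natAbs) * b.natAbs := rfl
  have hb : p.natAbs * b.natAbs ≤ (val.natAbs + 1) * b.natAbs * b.natAbs :=
    Nat.mul_le_mul_right _ h3
  omega

-- `def emit(v, m): return [] if m <= 0 else emit(v // b, m - 1) + [str(v % b)]`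
def emitB (b v m : Int) : List String :=
  if h : m ≤ 0 then []
  else emitB b (PySem.Int.floordiv v b) (m - 1) ++ [PySem.Int.toStr (PySem.Int.mod v b)]
termination_by m.toNat
decreasing_by omega

-- `i = 0; while i < len(out) - 1 and out[i] == "0": i += 1`
def leadB : List String → Nat
  | x :: y :: rest => if x = "0" then leadB (y :: rest) + 1 else 0
  | _ => 0

def radixDigitsB (val b : Int) : List String :=
  if val = 0 then ["0"]
  else
    let out := emitB b val (countLoopB val b 1 b)
    PySem.List.slice out (some ((leadB out : Nat) : Int)) none   -- out[i:]

-- `usable(x): 1 < len(x) < 11`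
def usableB (x : String) : Bool := 1 < PySem.Str.len x && PySem.Str.len x < 11

-- `res = 0; for d in digits: res = res * b + int(d)`
def hornerB (digits : List String) (b : Int) : Int :=
  digits.foldl (fun res d => res * b + pvIntOf d) 0

-- loop body of `for _ in range(limit + 1): if len(schedule) < need: schedule += …`
def schedStepB (need : Int) (sched : List String) : List String :=
  if PySem.List.len sched < need then
    sched ++ (radixDigitsB (pvIntOf (PySem.List.pyGetD sched (-1) "") + 65536) 65536).filter usableB
  else sched

def distributeRadix_alt (n : Int) (k : Int) (b : Int) (y : Int) : Int :=
  let state := radixDigitsB n b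
  let sched0 := (radixDigitsB k 65536).filter usableB
  let sched1 := if sched0 = [] then [PySem.Int.toStr (PySem.Int.mod k (65536 - 2) + 2)] else sched0
  let limit := (PySem.List.len state + 2) * 40
  let need := if y = 1 then PySem.List.len state + 1 else PySem.List.len state
  let sched2 := (PySem.List.pyRange 0 (limit + 1) 1).foldl (fun s _ => schedStepB need s) sched1
  let sched3 :=
    if PySem.List.len sched2 < need then
      sched2 ++ List.replicate (need - PySem.List.len sched2).toNat (PySem.List.pyGetD sched2 (-1) "")
    else sched2
  if y = 1 then
    let guard := PySem.Int.mod (1 - PySem.Int.mod (pvIntOf (PySem.List.pyGetD sched3 0 "")) b) b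
    hornerB (List.zipWith
      (fun a z => PySem.Int.toStr (PySem.Int.mod (pvIntOf a + pvIntOf z) b))
      (PySem.Int.toStr guard :: state) sched3) b
  else
    let mixed := List.zipWith
      (fun a z => PySem.Int.toStr (PySem.Int.mod (pvIntOf a - pvIntOf z) b)) state sched3
    if PySem.List.len mixed ≤ 1 then 0 else hornerB (PySem.List.slice mixed (some 1) none) b

-- ===== PRECONDITION & SPEC =====
-- A raises or diverges exactly here: b = 0 (ZeroDivisionError or an endless powers loop) and
-- b = ±1 with n ≥ 1 (the squaring powers loop never exceeds val); Pre_ excludes only those.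
def Pre_distributeRadix (n : Int) (k : Int) (b : Int) (y : Int) : Prop :=
  b ≠ 0 ∧ ((b = 1 ∨ b = -1) → n ≤ 0)
instance (n : Int) (k : Int) (b : Int) (y : Int) : Decidable (Pre_distributeRadix n k b y) := by
  unfold Pre_distributeRadix; infer_instance

def pvWitness_distributeRadix : Int × Int × Int × Int := (123, 45, 8, 1)

def Spec_distributeRadix (n : Int) (k : Int) (b : Int) (y : Int) (out : Int) : Prop :=
  out = distributeRadix_alt n k b y
instance (n : Int) (k : Int) (b : Int) (y : Int) (out : Int) :
    Decidable (Spec_distributeRadix n k b y out) := by unfold Spec_distributeRadix; infer_instance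

-- ===== CLAIM =====
def Claim_equal_distributeRadix : Prop :=
  ∀ (n : Int) (k : Int) (b : Int) (y : Int), Dom_distributeRadix n k b y →
    Pre_distributeRadix n k b y → Spec_distributeRadix n k b y (distributeRadix n k b y)

-- ===== LEMMAS AND PROOFS =====

def lowD (b : Int) : Nat → Int → List String
  | 0, _ => []
  | m + 1, v => PySem.Int.toStr (PySem.Int.mod v b) :: lowD b m (PySem.Int.floordiv v b)

def iterDivD (b : Int) : Nat → Int → Int
  | 0, v => v
  | m + 1, v => iterDivD b m (PySem.Int.floordiv v b)

theorem foldl_digits (b : Int) (L : List Int) : ∀ (acc : List String) (v : Int),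
    L.foldl (fun (st : List String × Int) _ =>
      (st.1 ++ [PySem.Int.toStr (PySem.Int.mod st.2 b)], PySem.Int.floordiv st.2 b)) (acc, v)
    = (acc ++ lowD b L.length v, iterDivD b L.length v) := by
  induction L with
  | nil => intro acc v; simp [lowD, iterDivD]
  | cons x xs ih =>
    intro acc v
    simp only [List.foldl_cons, List.length_cons, ih, lowD, iterDivD]
    simp

theorem lowD_length (b : Int) : ∀ (m : Nat) (v : Int), (lowD b m v).length = m := by
  intro m
  induction m with
  | zero => intro v; rfl
  | succ m ih => intro v; simp [lowD, ih]

theorem emitB_eq (b : Int) : ∀ (m v : Int), emitB b v m = (lowD b m.toNat v).reverse := by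
  have key : ∀ (mn : Nat) (m v : Int), m.toNat = mn → emitB b v m = (lowD b m.toNat v).reverse := by
    intro mn
    induction mn with
    | zero =>
      intro m v hm
      rw [emitB, dif_pos (by omega), hm]
      simp [lowD]
    | succ mn ih =>
      intro m v hm
      rw [emitB, dif_neg (by omega), ih (m - 1) _ (by omega)]
      have h1 : m.toNat = (m - 1).toNat + 1 := by omega
      rw [h1, lowD]
      simp
  exact fun m v => key m.toNat m v rfl

-- S1: splitting low digits at position h (0 < b)
theorem lowD_add (b : Int) (hb : 0 < b) : ∀ (h r : Nat) (v : Int),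
    lowD b (h + r) v = lowD b h v ++ lowD b r (v / b ^ h) := by
  intro h
  induction h with
  | zero => intro r v; simp [lowD]
  | succ h ih =>
    intro r v
    have : h + 1 + r = (h + r) + 1 := by omega
    rw [this, lowD, lowD, ih r (PySem.Int.floordiv v b)]
    rw [PySem.Int.floordiv_eq_ediv_of_pos hb]
    have : v / b / b ^ h = v / b ^ (h + 1) := by
      rw [Int.ediv_ediv_of_nonneg (le_of_lt hb), ← pow_succ']
    rw [this]
    simp

-- S2: low digits depend only on v mod b^h
theorem lowD_congr (b : Int) (hb : 0 < b) : ∀ (h : Nat) (v w : Int),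
    v % b ^ h = w % b ^ h → lowD b h v = lowD b h w := by
  intro h
  induction h with
  | zero => intro v w _; rfl
  | succ h ih =>
    intro v w hvw
    have hdvd : b ∣ b ^ (h + 1) := dvd_pow_self b (Nat.succ_ne_zero h)
    have h1 : v % b = w % b := by
      rw [← Int.emod_emod_of_dvd v hdvd, ← Int.emod_emod_of_dvd w hdvd, hvw]
    have hbne : b ≠ 0 := ne_of_gt hb
    have key : ∀ u : Int, (u / b) % b ^ h = (u % b ^ (h+1)) / b % b ^ h := by
      intro u
      conv_lhs => rw [← Int.mul_ediv_add_emod u (b ^ (h+1))]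
      rw [pow_succ' b h, mul_assoc, add_comm,
        Int.add_mul_ediv_left _ _ hbne, Int.add_mul_emod_self_left]
    have h2 : (v / b) % b ^ h = (w / b) % b ^ h := by
      rw [key v, key w, hvw]
    rw [lowD, lowD, PySem.Int.mod_eq_emod_of_pos hb, PySem.Int.mod_eq_emod_of_pos hb,
      PySem.Int.floordiv_eq_ediv_of_pos hb, PySem.Int.floordiv_eq_ediv_of_pos hb,
      h1, ih _ _ h2]

theorem convert_flat (b v tl : Int) (hb : 0 < b) :
    convertA b v tl = (lowD b tl.toNat v).reverse := by
  induction v, tl using convertA.induct b with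
  | case1 v tl h =>
    rw [convertA, if_pos h, foldl_digits]
    simp [PySem.List.length_pyRange_one]
  | case2 v tl h half divisor upperVal lowerVal ihU ihL =>
    rw [convertA, if_neg h]
    show convertA b upperVal (tl - half) ++ convertA b lowerVal half = (lowD b tl.toNat v).reverse
    have h2 : PySem.Int.floordiv tl 2 = tl / 2 :=
      PySem.Int.floordiv_eq_ediv_of_pos (by norm_num)
    have hD : (0:Int) < b ^ (PySem.Int.floordiv tl 2).toNat := pow_pos hb _
    have hsplit : tl.toNat = (PySem.Int.floordiv tl 2).toNat + (tl - PySem.Int.floordiv tl 2).toNat := by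
      rw [h2]; omega
    have hU : upperVal = v / b ^ half.toNat := PySem.Int.floordiv_eq_ediv_of_pos hD
    have hL : lowD b half.toNat lowerVal = lowD b half.toNat v := by
      apply lowD_congr b hb
      show PySem.Int.mod v (b ^ half.toNat) % b ^ half.toNat = v % b ^ half.toNat
      rw [PySem.Int.mod_eq_emod_of_pos hD, Int.emod_emod_of_dvd _ (dvd_refl _)]
    rw [ihU, ihL, hU, hL, hsplit, lowD_add b hb, List.reverse_append]

def stepG (val : Int) (p st : Int × Int) : Int × Int :=
  if st.2 * p.2 ≤ val then (st.1 + p.1, st.2 * p.2) else st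

theorem absPow (b : Int) (n : Nat) : |b ^ n| = |b| ^ n := abs_pow b n

theorem two_le_abs_pow (b : Int) (habs : 2 ≤ |b|) (n : Nat) (hn : 1 ≤ n) : 2 ≤ |b| ^ n :=
  le_trans habs (le_self_pow₀ (by omega) (by omega))

theorem q_lt_sq (q : Int) (h2 : 2 ≤ |q|) : q < q * q := by
  rcases abs_cases q with ⟨h, _⟩ | ⟨h, _⟩ <;> nlinarith

theorem powG (val b : Int) (hb : 2 ≤ b.natAbs) : ∀ (e q : Int), ∀ (i : Nat),
    e = (2:Int) ^ i → q = b ^ (2 ^ i : Nat) →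
    ∃ kk : Nat,
      (powersAuxA val e q).foldr (stepG val) (0, 1) = ((kk : Int), b ^ kk) ∧
      (2 ^ i : Nat) ∣ kk ∧
      val < b ^ (kk + 2 ^ i : Nat) ∧
      (∀ m : Nat, 1 ≤ m → m ≤ kk → b ^ m ≤ val) := by
  have hb0 : b ≠ 0 := by
    intro h; rw [h] at hb; simp at hb
  have habs : (2:Int) ≤ |b| := by
    rcases Int.natAbs_eq b with h | h <;> rw [h] <;> [skip; rw [abs_neg]] <;>
      rw [abs_of_nonneg (by positivity)] <;> exact_mod_cast hb
  intro e q
  induction e, q using powersAuxA.induct val with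
  | case1 e q h ih =>
    rcases h with ⟨hqval, -⟩
    intro i he hq
    obtain ⟨kk', hfold, hdvd, hbound, hall⟩ := ih (i+1)
      (by rw [he]; ring)
      (by rw [hq, ← pow_add]; congr 1; omega)
    have habsq : (2:Int) ≤ |q| := by
      rw [hq, absPow]; exact two_le_abs_pow b habs _ Nat.one_le_two_pow
    rw [powersAuxA, dif_pos ⟨hqval, q_lt_sq q habsq⟩, List.foldr_cons, hfold]
    unfold stepG
    simp only
    rw [hq, ← pow_add]
    by_cases hc : b ^ (kk' + 2 ^ i : Nat) ≤ val
    · rw [if_pos hc]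
      have hkdvd : (2 ^ i : Nat) ∣ kk' + 2 ^ i :=
        dvd_add (dvd_trans (pow_dvd_pow 2 (by omega)) hdvd) dvd_rfl
      refine ⟨kk' + 2 ^ i, ?_, hkdvd, ?_, ?_⟩
      · rw [he]; constructor <;> push_cast <;> ring
      · have : (kk' + 2 ^ i) + 2 ^ i = kk' + 2 ^ (i + 1) := by
          have : (2:Nat) ^ (i+1) = 2 ^ i + 2 ^ i := by rw [pow_succ]; omega
          omega
        rw [this]; exact hbound
      · intro m hm1 hmk
        by_cases hm : m ≤ kk'
        · exact hall m hm1 hm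
        · rcases Nat.eq_zero_or_pos i with hi | hi
          · subst hi
            have : m = kk' + 1 := by simpa using by omega
            simpa [this] using hc
          · have hkke : Even kk' := by
              obtain ⟨t, ht⟩ := hdvd
              exact ⟨2 ^ i * t, by rw [ht, pow_succ]; ring⟩
            have heven : Even (kk' + 2 ^ i : Nat) :=
              Even.add hkke (Nat.even_pow.mpr ⟨even_two, by omega⟩)
            have hpos : (0:Int) < b ^ (kk' + 2 ^ i : Nat) := heven.pow_pos hb0
            have hval1 : (1:Int) ≤ val := hpos.trans_le hc
            rcases lt_or_gt_of_ne hb0 with hbneg | hbpos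
            · rcases Nat.even_or_odd m with hme | hmo
              · calc b ^ m = |b| ^ m := (hme.pow_abs b).symm
                  _ ≤ |b| ^ (kk' + 2 ^ i : Nat) :=
                      pow_le_pow_right₀ (by omega) (by omega)
                  _ = b ^ (kk' + 2 ^ i : Nat) := heven.pow_abs b
                  _ ≤ val := hc
              · exact le_trans (le_of_lt (hmo.pow_neg hbneg)) (by omega)
            · calc b ^ m ≤ b ^ (kk' + 2 ^ i : Nat) :=
                    pow_le_pow_right₀ (by omega) (by omega)
                _ ≤ val := hc
    · rw [if_neg hc]
      refine ⟨kk', rfl, dvd_trans (pow_dvd_pow 2 (by omega)) hdvd, by omega, hall⟩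
  | case2 e q h =>
    intro i he hq
    have habsq : (2:Int) ≤ |q| := by
      rw [hq, absPow]; exact two_le_abs_pow b habs _ Nat.one_le_two_pow
    have hval : val < q := by
      by_contra hcon
      exact h ⟨by omega, q_lt_sq q habsq⟩
    rw [powersAuxA, dif_neg h]
    refine ⟨0, ?_, dvd_zero _, by rw [hq] at hval; simpa using hval, by omega⟩
    simp only [List.foldr_cons, List.foldr_nil]
    unfold stepG
    simp only [one_mul]
    rw [if_neg (by omega)]
    norm_num

theorem countB (val b : Int) (hb : 2 ≤ b.natAbs) (kk : Nat)
    (hbound : val < b ^ (kk + 1))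
    (hall : ∀ m : Nat, 1 ≤ m → m ≤ kk → b ^ m ≤ val) :
    countLoopB val b 1 b = (kk : Int) + 1 := by
  have key : ∀ (d j : Nat), kk - j = d → j ≤ kk →
      countLoopB val b ((j:Int) + 1) (b ^ (j + 1)) = (kk:Int) + 1 := by
    intro d
    induction d with
    | zero =>
      intro j hd hj
      have hj' : j = kk := by omega
      subst hj'
      rw [countLoopB, dif_neg (fun hx => absurd hx.1 (not_le.mpr hbound))]
    | succ d ihd =>
      intro j hd hj
      have hjlt : j < kk := by omega
      have hple : b ^ (j + 1) ≤ val := hall (j+1) (by omega) (by omega)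
      have hP1 : 0 < b.natAbs ^ (j + 1) := Nat.pow_pos (by omega)
      have habs2 : ∀ m : Nat, Even m → b ^ m ≤ val → b.natAbs ^ m ≤ val.natAbs := by
        intro m hme hmle
        have h1 : ((b.natAbs ^ m : Nat) : Int) = b ^ m := by
          push_cast
          first
          | exact hme.pow_abs b
          | (rw [← Int.abs_eq_natAbs]; exact hme.pow_abs b)
        have h3 : ((b.natAbs ^ m : Nat) : Int) ≤ ((val.natAbs : Nat) : Int) := by
          rw [h1, ← Int.abs_eq_natAbs]
          exact le_trans hmle (le_abs_self val)
        exact_mod_cast h3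
      have hg2 : (b ^ (j+1)).natAbs < ((b ^ (j+1)) * b).natAbs := by
        rw [Int.natAbs_mul, Int.natAbs_pow]
        calc b.natAbs ^ (j+1) = 1 * b.natAbs ^ (j+1) := (one_mul _).symm
          _ < b.natAbs * b.natAbs ^ (j+1) :=
              mul_lt_mul_of_pos_right (by omega) hP1
          _ = b.natAbs ^ (j+1) * b.natAbs := by ring
      have hg3 : (b ^ (j+1)).natAbs ≤ (val.natAbs + 1) * b.natAbs := by
        rw [Int.natAbs_pow]
        rcases Nat.even_or_odd (j+1) with hje | hjo
        · have := habs2 (j+1) hje hple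
          have hstep : val.natAbs ≤ (val.natAbs + 1) * b.natAbs := by
            calc val.natAbs ≤ val.natAbs * b.natAbs := Nat.le_mul_of_pos_right _ (by omega)
              _ ≤ (val.natAbs + 1) * b.natAbs := Nat.mul_le_mul_right _ (by omega)
          omega
        · rcases Nat.eq_zero_or_pos j with hj0 | hjpos
          · subst hj0
            simpa using Nat.le_mul_of_pos_left b.natAbs (by omega : 0 < val.natAbs + 1)
          · have hjeven : Even j := by
              rcases hjo with ⟨t, ht⟩
              exact ⟨t, by omega⟩
            have hjle : b ^ j ≤ val := hall j (by omega) (by omega)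
            have := habs2 j hjeven hjle
            calc b.natAbs ^ (j+1) = b.natAbs ^ j * b.natAbs := by rw [pow_succ]
              _ ≤ val.natAbs * b.natAbs := Nat.mul_le_mul_right _ this
              _ ≤ (val.natAbs + 1) * b.natAbs := Nat.mul_le_mul_right _ (by omega)
      rw [countLoopB, dif_pos ⟨hple, hg2, hg3⟩, ← pow_succ]
      have hcast : ((j:Int) + 1) + 1 = (((j+1 : Nat)):Int) + 1 := by push_cast; ring
      rw [hcast]
      exact ihd (j+1) (by omega) (by omega)
  have := key kk 0 (by omega) (by omega)
  simpa using this

theorem strip_eq_slice (l : List String) :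
    stripA l = PySem.List.slice l (some ((leadB l : Nat) : Int)) none := by
  rw [PySem.List.slice_from_natCast]
  induction l with
  | nil => rfl
  | cons x xs ih =>
    cases xs with
    | nil => rfl
    | cons y rest =>
      rw [stripA, leadB]
      by_cases hx : x = "0"
      · rw [if_pos hx, if_pos hx, ih]
        rfl
      · rw [if_neg hx, if_neg hx]
        rfl

-- base-branch convert is exactly the flat least-significant-first emission, reversed
theorem convert_base (b v tl : Int) (h : tl ≤ 500) :
    convertA b v tl = (lowD b tl.toNat v).reverse := by
  rw [convertA, if_pos h, foldl_digits]
  simp [PySem.List.length_pyRange_one]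

theorem countsEq (val b : Int) (hb : 2 ≤ b.natAbs) :
    ∃ kk : Nat,
      ((powersAuxA val 1 b).reverse.foldl
        (fun (st : Int × Int) (p : Int × Int) =>
          if st.2 * p.2 ≤ val then (st.1 + p.1, st.2 * p.2) else st) (0, 1))
        = ((kk : Int), b ^ kk) ∧
      countLoopB val b 1 b = (kk : Int) + 1 ∧
      val < b ^ (kk + 1) ∧ (∀ m : Nat, 1 ≤ m → m ≤ kk → b ^ m ≤ val) := by
  obtain ⟨kk, hfold, -, hbound, hall⟩ :=
    powG val b hb 1 b 0 (by norm_num) (by norm_num)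
  have hbound' : val < b ^ (kk + 1) := by simpa using hbound
  refine ⟨kk, ?_, countB val b hb kk hbound' hall, hbound', hall⟩
  rw [List.foldl_reverse]
  exact hfold

theorem kk_small (val b : Int) (hb : 2 ≤ b.natAbs) (hval : val ≤ 2147483648)
    (kk : Nat) (hall : ∀ m : Nat, 1 ≤ m → m ≤ kk → b ^ m ≤ val) : kk ≤ 32 := by
  by_contra hcon
  have h32 : b ^ (32:Nat) ≤ val := hall 32 (by omega) (by omega)
  have habs : (2:Int) ≤ |b| := by
    rcases Int.natAbs_eq b with h | h <;> rw [h] <;> [skip; rw [abs_neg]] <;>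
      rw [abs_of_nonneg (by positivity)] <;> exact_mod_cast hb
  have heven : Even (32:Nat) := by decide
  have : (2:Int) ^ (32:Nat) ≤ b ^ (32:Nat) := by
    calc (2:Int) ^ (32:Nat) ≤ |b| ^ (32:Nat) := by
          apply pow_le_pow_left₀ (by norm_num) habs
      _ = b ^ (32:Nat) := heven.pow_abs b
  norm_num at this
  omega

theorem digitsEq (val b : Int) (hb0 : b ≠ 0) (h1 : (b = 1 ∨ b = -1) → val ≤ 0)
    (hneg : b ≤ -2 → val ≤ 2147483648) :
    computeRadixDigitsA val b = radixDigitsB val b := by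
  by_cases hv0 : val = 0
  · subst hv0; rfl
  · unfold computeRadixDigitsA radixDigitsB
    rw [if_neg hv0, if_neg hv0]
    show stripA (convertA b val
        (((powersAuxA val 1 b).reverse.foldl
          (fun (st : Int × Int) (p : Int × Int) =>
            if st.2 * p.2 ≤ val then (st.1 + p.1, st.2 * p.2) else st) (0, 1)).1 + 1))
      = PySem.List.slice (emitB b val (countLoopB val b 1 b))
          (some ((leadB (emitB b val (countLoopB val b 1 b)) : Nat) : Int)) none
    by_cases hb : 2 ≤ b.natAbs
    · obtain ⟨kk, hA, hB, hbound, hall⟩ := countsEq val b hb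
      rw [hA, hB]
      simp only
      by_cases hbpos : 0 < b
      · rw [convert_flat b val ((kk:Int)+1) hbpos, ← emitB_eq, strip_eq_slice]
      · have hble : b ≤ -2 := by omega
        have hkk : kk ≤ 32 := kk_small val b hb (hneg hble) kk hall
        rw [convert_base b val ((kk:Int)+1) (by omega), ← emitB_eq, strip_eq_slice]
    · have hb1 : b = 1 ∨ b = -1 := by omega
      have hvneg : val < 0 := by
        have := h1 hb1
        omega
      rcases hb1 with hb1 | hb1
      · subst hb1
        rw [powersAuxA, dif_neg (by norm_num)]
        rw [countLoopB, dif_neg (by norm_num)]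
        simp only [List.reverse_cons, List.reverse_nil, List.nil_append,
          List.foldl_cons, List.foldl_nil]
        rw [if_neg (by norm_num; omega)]
        rw [convert_base 1 val _ (by norm_num), ← emitB_eq, strip_eq_slice]
        norm_num
      · subst hb1
        by_cases hvm1 : val = -1
        · subst hvm1
          rw [powersAuxA, dif_pos (by norm_num)]
          rw [powersAuxA, dif_neg (by norm_num)]
          rw [countLoopB, dif_neg (by norm_num)]
          rw [convert_base (-1) (-1) _ (by norm_num)]
          rw [strip_eq_slice, emitB_eq]
          decide
        · have hvle : val ≤ -2 := by omega
          rw [powersAuxA, dif_neg (fun hx => absurd hx.1 (by omega))]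
          rw [countLoopB, dif_neg (fun hx => absurd hx.1 (by omega))]
          simp only [List.reverse_cons, List.reverse_nil, List.nil_append,
            List.foldl_cons, List.foldl_nil]
          rw [if_neg (by norm_num; omega)]
          rw [convert_base (-1) val _ (by norm_num), ← emitB_eq, strip_eq_slice]
          norm_num

theorem emitB_len (b : Int) : ∀ (m v : Int), (emitB b v m).length = m.toNat := by
  intro m v
  rw [emitB_eq, List.length_reverse, lowD_length]

theorem digitsLenB (val b : Int) (hval : val ≤ 2147483648) (hb0 : b ≠ 0)
    (h1 : (b = 1 ∨ b = -1) → val ≤ 0) : (radixDigitsB val b).length ≤ 40 := by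
  unfold radixDigitsB
  by_cases hv0 : val = 0
  · rw [if_pos hv0]; norm_num
  · rw [if_neg hv0]
    show (PySem.List.slice (emitB b val (countLoopB val b 1 b))
      (some ((leadB (emitB b val (countLoopB val b 1 b)) : Nat) : Int)) none).length ≤ 40
    rw [PySem.List.slice_from_natCast]
    have hcnt : (countLoopB val b 1 b).toNat ≤ 40 := by
      by_cases hb : 2 ≤ b.natAbs
      · obtain ⟨kk, -, hB, -, hall⟩ := countsEq val b hb
        have hkk : kk ≤ 32 := kk_small val b hb hval kk hall
        rw [hB]; omega
      · have hb1 : b = 1 ∨ b = -1 := by omega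
        have hvneg : val < 0 := by have := h1 hb1; omega
        rcases hb1 with hb1 | hb1 <;> subst hb1
        · rw [countLoopB, dif_neg (by norm_num)]; norm_num
        · by_cases hvm1 : val = -1
          · subst hvm1; rw [countLoopB, dif_neg (by norm_num)]; norm_num
          · rw [countLoopB, dif_neg (fun hx => absurd hx.1 (by omega))]; norm_num
    calc ((emitB b val (countLoopB val b 1 b)).drop (leadB _)).length
        ≤ (emitB b val (countLoopB val b 1 b)).length := by
          rw [List.length_drop]; omega
      _ ≤ 40 := by rw [emitB_len]; exact hcnt

theorem digitsEq65536 (val : Int) : computeRadixDigitsA val 65536 = radixDigitsB val 65536 :=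
  digitsEq val 65536 (by norm_num) (fun h => absurd h (by norm_num)) (fun h => absurd h (by norm_num))

theorem filterEq (l : List String) : schedFilterA l = l.filter usableB := by
  unfold schedFilterA usableB
  apply List.filter_congr
  intro x _
  rw [Bool.eq_iff_iff]
  simp only [Bool.and_eq_true, decide_eq_true_eq]
  omega

theorem schedStep_of_ge (need : Int) (sched : List String)
    (h : ¬ PySem.List.len sched < need) : schedStepB need sched = sched := by
  rw [schedStepB, if_neg h]

theorem schedLoopA_of_ge (need : Int) (f : Nat) (sched : List String)
    (h : ¬ PySem.List.len sched < need) : schedLoopA need f sched = sched := by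
  cases f with
  | zero => rfl
  | succ f => rw [schedLoopA, if_neg h]

theorem schedFoldEq (need : Int) : ∀ (L : List Int) (sched : List String),
    L.foldl (fun s _ => schedStepB need s) sched = schedLoopA need L.length sched := by
  intro L
  induction L with
  | nil => intro sched; rfl
  | cons x xs ih =>
    intro sched
    rw [List.foldl_cons, List.length_cons, schedLoopA]
    by_cases h : PySem.List.len sched < need
    · rw [if_pos h, schedStepB, if_pos h, ih, digitsEq65536, filterEq]
    · rw [if_neg h, schedStep_of_ge need sched h, ih, schedLoopA_of_ge need _ _ h]

theorem schedFoldEq2 (need L : Int) (sched : List String) :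
    (PySem.List.pyRange 0 L 1).foldl (fun s _ => schedStepB need s) sched
      = schedLoopA need L.toNat sched := by
  rw [schedFoldEq, PySem.List.length_pyRange_one]
  norm_num

theorem zip_map_eq_zipWith (f : String → String → String) (l1 l2 : List String) :
    (l1.zip l2).map (fun az => f az.1 az.2) = List.zipWith f l1 l2 := by
  induction l1 generalizing l2 with
  | nil => simp
  | cons x xs ih => cases l2 <;> simp [ih]

theorem decodeEq (mixed : List String) (b : Int) (hlen : mixed.length ≤ 200) :
    decodeRadixStreamA mixed b = hornerB mixed b := by
  unfold decodeRadixStreamA hornerB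
  split
  · rename_i h; rw [h]; rfl
  · rw [evalRangeA, if_pos (by simp; omega)]
    rw [PySem.List.foldl_pyRange_zero_pyGetD (mixed.map pvIntOf) 0 (fun acc d => acc * b + d) 0]
    rw [List.foldl_map]

-- ===== VERDICT =====
set_option maxHeartbeats 1000000 in
theorem distributeRadix_spec : Claim_equal_distributeRadix := by
  intro n k b y hdom hpre
  obtain ⟨hb0, h1⟩ := hpre
  simp only [Dom_distributeRadix, pvDomInt, Bool.and_eq_true, decide_eq_true_eq] at hdom
  obtain ⟨⟨⟨hn, hk⟩, hbb⟩, hy⟩ := hdom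
  unfold Spec_distributeRadix distributeRadix distributeRadix_alt
  have hdig : computeRadixDigitsA n b = radixDigitsB n b :=
    digitsEq n b hb0 h1 (fun _ => hn.2)
  have hlenSD : (radixDigitsB n b).length ≤ 40 := digitsLenB n b hn.2 hb0 h1
  simp only [hdig, digitsEq65536 k, filterEq, schedFoldEq2, ← zip_map_eq_zipWith]
  by_cases hy1 : y = 1
  · simp only [if_pos hy1]
    apply decodeEq
    simp only [List.length_map, List.length_zip, List.length_cons]
    omega
  · simp only [if_neg hy1]
    refine if_congr Iff.rfl rfl ?_
    apply decodeEq
    rw [PySem.List.slice_from_one]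
    simp only [List.length_tail, List.length_map, List.length_zip]
    omega
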